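-- pv_equiv track=rewrite | github.com/arpanauts/biomapper | biomapper/core/services/bidirectional_validation_service.py | _normalize_arivale_id
-- ===== SOURCE A (Python) =====
-- from typing import Dict, Any, Set, Optional
--
-- def _normalize_arivale_id(identifier: Optional[str]) -> Optional[str]:
--     """
--     Normalize Arivale IDs by removing prefixes.
--
--     Args:
--         identifier: The identifier to normalize
--
--     Returns:
--         Normalized identifier or original if not an Arivale ID
--     """
--     if not identifier:
--         return identifier
--
--     arivale_prefixes = ('INF_', 'CAM_', 'CVD_', 'CVD2_', 'DEV_')
--     if any(identifier.startswith(p) for p in arivale_prefixes):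
--         parts = identifier.split('_', 1)
--         if len(parts) > 1 and parts[1]:  # Check that there's content after the prefix
--             return parts[1]  # Return the part after the prefix
--
--     return identifier
-- ===== SOURCE B (Python) =====
-- def _normalize_arivale_id(identifier):
--     """Normalize Arivale IDs by a hand-rolled character decision tree (prefix trie)."""
--     if not identifier:
--         return identifier
--     s = identifier
--     cut = 0
--     if len(s) > 4:
--         c0, c1, c2, c3 = s[0], s[1], s[2], s[3]
--         if c0 == 'I' and c1 == 'N' and c2 == 'F' and c3 == '_':
--             cut = 4
--         elif c0 == 'C' and c1 == 'A' and c2 == 'M' and c3 == '_':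
--             cut = 4
--         elif c0 == 'D' and c1 == 'E' and c2 == 'V' and c3 == '_':
--             cut = 4
--         elif c0 == 'C' and c1 == 'V' and c2 == 'D':
--             if c3 == '_':
--                 cut = 4
--             elif c3 == '2' and len(s) > 5 and s[4] == '_':
--                 cut = 5
--     return s[cut:] if cut else s
-- ===== Notes on version B (the rewrite author's own statement) =====
-- stated objective: alternative
-- what changed: Replaces the any(startswith)-over-a-prefix-tuple scan plus split-at-first-underscore with a hand-rolled character decision tree (a trie over the five prefixes) that inspects individual characters and computes a cut index, slicing once at the end.
import Mathlib
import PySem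

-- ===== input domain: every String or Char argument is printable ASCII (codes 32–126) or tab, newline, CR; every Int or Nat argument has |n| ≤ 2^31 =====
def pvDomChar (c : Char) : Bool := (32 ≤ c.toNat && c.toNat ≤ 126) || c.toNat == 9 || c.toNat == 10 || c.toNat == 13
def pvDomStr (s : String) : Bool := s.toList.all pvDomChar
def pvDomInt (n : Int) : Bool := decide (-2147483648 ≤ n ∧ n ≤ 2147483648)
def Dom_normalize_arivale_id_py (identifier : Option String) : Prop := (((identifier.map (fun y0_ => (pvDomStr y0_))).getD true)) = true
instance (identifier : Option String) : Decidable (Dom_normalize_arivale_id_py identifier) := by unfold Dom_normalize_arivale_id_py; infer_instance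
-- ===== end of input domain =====

-- B replaces the any(startswith)-over-the-prefix-tuple scan plus split('_',1) with a
-- hand-rolled character decision tree (a trie over the five prefixes) computing a cut
-- index, slicing once at the end (objective: alternative, same cost).

-- ===== PORT A =====
def normalize_arivale_id_py (identifier : Option String) : Option String :=
  match identifier with
  | none => none
  | some s =>
    if s = "" then some s
    else
      let arivale_prefixes : List String := ["INF_", "CAM_", "CVD_", "CVD2_", "DEV_"]
      if arivale_prefixes.any (fun p => PySem.Str.startswith s p) then
        match PySem.Str.splitMax? s "_" 1 with
        | some parts =>
            if 1 < parts.length ∧ parts.getD 1 "" ≠ "" then some (parts.getD 1 "")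
            else some s
        | none => some s
      else some s

-- ===== PORT B =====
-- s[i] under the `len(s) > 4` / `len(s) > 5` guards is always in range, so `getD i ' '`
-- is exact there; s[cut:] with 0 ≤ cut is List.drop.
def normalize_arivale_id_py_alt (identifier : Option String) : Option String :=
  match identifier with
  | none => none
  | some s =>
    if s = "" then some s
    else
      let l := s.toList
      let cut : Nat :=
        if 4 < l.length then
          let c0 := l.getD 0 ' '
          let c1 := l.getD 1 ' '
          let c2 := l.getD 2 ' '
          let c3 := l.getD 3 ' '
          if c0 = 'I' ∧ c1 = 'N' ∧ c2 = 'F' ∧ c3 = '_' then 4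
          else if c0 = 'C' ∧ c1 = 'A' ∧ c2 = 'M' ∧ c3 = '_' then 4
          else if c0 = 'D' ∧ c1 = 'E' ∧ c2 = 'V' ∧ c3 = '_' then 4
          else if c0 = 'C' ∧ c1 = 'V' ∧ c2 = 'D' then
            if c3 = '_' then 4
            else if c3 = '2' ∧ 5 < l.length ∧ l.getD 4 ' ' = '_' then 5
            else 0
          else 0
        else 0
      if cut ≠ 0 then some (String.ofList (l.drop cut)) else some s

-- ===== PRECONDITION & SPEC =====
def Spec_normalize_arivale_id_py (identifier : Option String) (out : Option String) : Prop := out = normalize_arivale_id_py_alt identifier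
instance (identifier : Option String) (out : Option String) : Decidable (Spec_normalize_arivale_id_py identifier out) := by unfold Spec_normalize_arivale_id_py; infer_instance

-- ===== CLAIM (what is proved, stated in full; the proofs are below) =====
def Claim_equal_normalize_arivale_id_py : Prop := ∀ (identifier : Option String), Dom_normalize_arivale_id_py identifier → Spec_normalize_arivale_id_py identifier (normalize_arivale_id_py identifier)

-- ===== LEMMAS AND PROOFS =====

lemma go_zero (fuel : Nat) (l : List Char) (acc : List (List Char)) :
    PySem.Chars.splitOnMax.go ['_'] fuel 0 l [] acc = (l :: acc).reverse := by
  cases fuel <;> cases l <;> simp [PySem.Chars.splitOnMax.go]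

lemma go_one (q : List Char) (hq : ('_' : Char) ∉ q) :
    ∀ (fuel : Nat) (cur : List Char) (acc : List (List Char)) (rest : List Char),
      q.length < fuel →
      PySem.Chars.splitOnMax.go ['_'] fuel 1 (q ++ '_' :: rest) cur acc
        = acc.reverse ++ [cur.reverse ++ q, rest] := by
  induction q with
  | nil =>
      intro fuel cur acc rest hf
      cases fuel with
      | zero => omega
      | succ f =>
          simp [PySem.Chars.splitOnMax.go, List.isPrefixOf, go_zero]
  | cons c t ih =>
      intro fuel cur acc rest hf
      cases fuel with
      | zero => omega
      | succ f =>
          have hc : c ≠ '_' := fun h => hq (h ▸ List.mem_cons_self ..)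
          have ht : ('_' : Char) ∉ t := fun h => hq (List.mem_cons_of_mem _ h)
          have hpf : (['_'] : List Char).isPrefixOf (c :: (t ++ '_' :: rest)) = false := by
            simp [List.isPrefixOf]
            exact fun h => absurd h.symm hc
          simp only [List.cons_append, PySem.Chars.splitOnMax.go, hpf]
          rw [if_neg (by omega : ¬ (1 : Nat) = 0)]
          rw [ih ht f (c :: cur) acc rest (by simpa using Nat.lt_of_succ_lt_succ hf)]
          simp

lemma splitOnMax_one (q rest : List Char) (hq : ('_' : Char) ∉ q) :
    PySem.Chars.splitOnMax (q ++ '_' :: rest) ['_'] 1 = [q, rest] := by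
  unfold PySem.Chars.splitOnMax
  rw [if_neg (by omega : ¬ (1 : Int) < 0)]
  have h1 : (1 : Int).toNat = 1 := rfl
  rw [h1, go_one q hq _ [] [] rest (by simp)]
  simp

-- A's value when the string decomposes as a recognised prefix head, '_', and a tail.
lemma A_pos (s : String) (q rest : List Char) (hq : ('_' : Char) ∉ q)
    (hs : s.toList = q ++ '_' :: rest)
    (hp : String.ofList (q ++ ['_']) ∈ (["INF_", "CAM_", "CVD_", "CVD2_", "DEV_"] : List String)) :
    normalize_arivale_id_py (some s)
      = if rest = [] then some s else some (String.ofList rest) := by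
  have hsne : s ≠ "" := by
    intro h; rw [h] at hs; simp at hs
  have htl : (String.ofList (q ++ ['_'])).toList = q ++ ['_'] := by simp
  have hsw : PySem.Str.startswith s (String.ofList (q ++ ['_'])) = true := by
    rw [PySem.Str.startswith_eq, PySem.Chars.startswith_iff, htl]
    exact ⟨rest, by rw [hs]; simp⟩
  have hany : (["INF_", "CAM_", "CVD_", "CVD2_", "DEV_"] : List String).any
      (fun p => PySem.Str.startswith s p) = true :=
    List.any_eq_true.2 ⟨_, hp, hsw⟩
  have hsplit : PySem.Str.splitMax? s "_" 1 = some [String.ofList q, String.ofList rest] := by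
    unfold PySem.Str.splitMax? PySem.Chars.splitMax?
    have h1 : ("_" : String).toList = ['_'] := by decide
    rw [h1, hs]
    simp [splitOnMax_one q rest hq]
  simp only [normalize_arivale_id_py]
  rw [if_neg hsne]
  simp only [hany, hsplit, if_true]
  by_cases hr : rest = []
  · subst hr; simp
  · have hofl : String.ofList rest ≠ "" := by
      intro h
      have := congrArg String.toList h
      simp at this
      exact hr this
    rw [if_pos ⟨by norm_num, by simpa using hofl⟩]
    simp [hr]

-- if l has more than 4 elements it decomposes into its first four getD-characters and a drop
lemma decomp4 (l : List Char) (h : 4 ≤ l.length) :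
    l = l.getD 0 ' ' :: l.getD 1 ' ' :: l.getD 2 ' ' :: l.getD 3 ' ' :: l.drop 4 := by
  match l, h with
  | a :: b :: c :: d :: t, _ => simp [List.getD]

lemma sw_of (s p : String) (rest : List Char) (hs : s.toList = p.toList ++ rest) :
    PySem.Str.startswith s p = true := by
  rw [PySem.Str.startswith_eq, PySem.Chars.startswith_iff]
  exact ⟨rest, hs.symm⟩

-- B's value when no recognised prefix heads the string
lemma B_neg (s : String) (hsne : s ≠ "")
    (h : ∀ p ∈ (["INF_", "CAM_", "CVD_", "CVD2_", "DEV_"] : List String),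
      PySem.Str.startswith s p = false) :
    normalize_arivale_id_py_alt (some s) = some s := by
  simp only [normalize_arivale_id_py_alt]
  rw [if_neg hsne]
  by_cases hg : 4 < s.toList.length
  · have hd := decomp4 s.toList (le_of_lt hg)
    have hsw : ∀ (p : String), p ∈ (["INF_", "CAM_", "CVD_", "CVD2_", "DEV_"] : List String) →
        ∀ rest, s.toList ≠ p.toList ++ rest := by
      intro p hp rest hc
      have := sw_of s p rest hc
      rw [h p hp] at this
      exact absurd this (by simp)
    rw [if_pos hg]
    by_cases h1 : s.toList.getD 0 ' ' = 'I' ∧ s.toList.getD 1 ' ' = 'N' ∧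
        s.toList.getD 2 ' ' = 'F' ∧ s.toList.getD 3 ' ' = '_'
    · exfalso
      exact hsw "INF_" (by decide) (s.toList.drop 4)
        (by rw [hd]; rw [h1.1, h1.2.1, h1.2.2.1, h1.2.2.2]; rfl)
    · rw [if_neg h1]
      by_cases h2 : s.toList.getD 0 ' ' = 'C' ∧ s.toList.getD 1 ' ' = 'A' ∧
          s.toList.getD 2 ' ' = 'M' ∧ s.toList.getD 3 ' ' = '_'
      · exfalso
        exact hsw "CAM_" (by decide) (s.toList.drop 4)
          (by rw [hd]; rw [h2.1, h2.2.1, h2.2.2.1, h2.2.2.2]; rfl)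
      · rw [if_neg h2]
        by_cases h3 : s.toList.getD 0 ' ' = 'D' ∧ s.toList.getD 1 ' ' = 'E' ∧
            s.toList.getD 2 ' ' = 'V' ∧ s.toList.getD 3 ' ' = '_'
        · exfalso
          exact hsw "DEV_" (by decide) (s.toList.drop 4)
            (by rw [hd]; rw [h3.1, h3.2.1, h3.2.2.1, h3.2.2.2]; rfl)
        · rw [if_neg h3]
          by_cases h4 : s.toList.getD 0 ' ' = 'C' ∧ s.toList.getD 1 ' ' = 'V' ∧
              s.toList.getD 2 ' ' = 'D'
          · rw [if_pos h4]
            by_cases h5 : s.toList.getD 3 ' ' = '_'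
            · exfalso
              exact hsw "CVD_" (by decide) (s.toList.drop 4)
                (by rw [hd]; rw [h4.1, h4.2.1, h4.2.2, h5]; rfl)
            · rw [if_neg h5]
              by_cases h6 : s.toList.getD 3 ' ' = '2' ∧ 5 < s.toList.length ∧
                  s.toList.getD 4 ' ' = '_'
              · exfalso
                have hd5 : s.toList = s.toList.getD 0 ' ' :: s.toList.getD 1 ' ' ::
                    s.toList.getD 2 ' ' :: s.toList.getD 3 ' ' :: s.toList.getD 4 ' ' ::
                    s.toList.drop 5 := by
                  match s.toList, h6.2.1 with
                  | a :: b :: c :: d :: e :: t, _ => simp [List.getD]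
                exact hsw "CVD2_" (by decide) (s.toList.drop 5)
                  (by rw [hd5]; rw [h4.1, h4.2.1, h4.2.2, h6.1, h6.2.2]; rfl)
              · rw [if_neg h6]
                simp
          · rw [if_neg h4]
            simp
  · rw [if_neg hg]
    simp

-- ===== VERDICT (by name: the statement is the Claim_ definition above) =====
theorem normalize_arivale_id_py_spec : Claim_equal_normalize_arivale_id_py := by
  intro identifier _
  unfold Spec_normalize_arivale_id_py
  cases identifier with
  | none => rfl
  | some s =>
      by_cases hsne : s = ""
      · subst hsne; rfl
      · by_cases hany : ((["INF_", "CAM_", "CVD_", "CVD2_", "DEV_"] : List String).any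
            (fun p => PySem.Str.startswith s p)) = true
        · obtain ⟨p, hp, hsw⟩ := List.any_eq_true.1 hany
          have hpre : p.toList <+: s.toList :=
            (PySem.Chars.startswith_iff _ _).1 (by rw [← PySem.Str.startswith_eq]; exact hsw)
          obtain ⟨rest, hrest⟩ := hpre
          simp only [List.mem_cons, List.not_mem_nil, or_false] at hp
          rcases hp with rfl | rfl | rfl | rfl | rfl
          · -- INF_
            have hs : s.toList = ['I','N','F'] ++ '_' :: rest := by rw [← hrest]; rfl
            rw [A_pos s ['I','N','F'] rest (by decide) hs (by decide)]
            simp only [normalize_arivale_id_py_alt]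
            rw [if_neg hsne]
            simp only [hs]
            cases rest with
            | nil => simp
            | cons a t => simp [List.getD]
          · -- CAM_
            have hs : s.toList = ['C','A','M'] ++ '_' :: rest := by rw [← hrest]; rfl
            rw [A_pos s ['C','A','M'] rest (by decide) hs (by decide)]
            simp only [normalize_arivale_id_py_alt]
            rw [if_neg hsne]
            simp only [hs]
            cases rest with
            | nil => simp
            | cons a t => simp [List.getD]
          · -- CVD_
            have hs : s.toList = ['C','V','D'] ++ '_' :: rest := by rw [← hrest]; rfl
            rw [A_pos s ['C','V','D'] rest (by decide) hs (by decide)]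
            simp only [normalize_arivale_id_py_alt]
            rw [if_neg hsne]
            simp only [hs]
            cases rest with
            | nil => simp
            | cons a t => simp [List.getD]
          · -- CVD2_
            have hs : s.toList = ['C','V','D','2'] ++ '_' :: rest := by rw [← hrest]; rfl
            rw [A_pos s ['C','V','D','2'] rest (by decide) hs (by decide)]
            simp only [normalize_arivale_id_py_alt]
            rw [if_neg hsne]
            simp only [hs]
            cases rest with
            | nil => simp [List.getD]
            | cons a t => simp [List.getD]
          · -- DEV_
            have hs : s.toList = ['D','E','V'] ++ '_' :: rest := by rw [← hrest]; rfl
            rw [A_pos s ['D','E','V'] rest (by decide) hs (by decide)]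
            simp only [normalize_arivale_id_py_alt]
            rw [if_neg hsne]
            simp only [hs]
            cases rest with
            | nil => simp
            | cons a t => simp [List.getD]
        · have hA : normalize_arivale_id_py (some s) = some s := by
            simp only [normalize_arivale_id_py]
            rw [if_neg hsne]
            simp only [Bool.not_eq_true] at hany
            rw [hany]
            simp
          rw [hA, B_neg s hsne (fun p hp =>
            Bool.eq_false_iff.2 (fun h => hany (List.any_eq_true.2 ⟨p, hp, h⟩)))]
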